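-- pv_equiv track=rewrite | github.com/pbarros78/python-examples-and-test | controles y tareas/controles/control5/r1.py | misteriosa
-- ===== SOURCE A (Python) =====
-- def misteriosa(n,m,i):
--    if i >= 0 :
--       if n[i] < m[i] :
--          aux = n[i]
--          n[i] = m[i]
--          m[i] = aux
--       return misteriosa(n,m,i-1)
--    return [n,m]
-- ===== SOURCE B (Python) =====
-- def misteriosa(n, m, i):
--     # Iterative version of the pairwise swap: descending loop instead of recursion.
--     for idx in range(i, -1, -1):
--         if n[idx] < m[idx]:
--             n[idx], m[idx] = m[idx], n[idx]
--     return [n, m]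
-- ===== Notes on version B (the rewrite author's own statement) =====
-- stated objective: simpler
-- what changed: Replaces the recursion with an explicit descending for-loop over range(i,-1,-1) with an in-place tuple swap, removing the recursive call stack (and Python's recursion-depth limit for large i).
import Mathlib
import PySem

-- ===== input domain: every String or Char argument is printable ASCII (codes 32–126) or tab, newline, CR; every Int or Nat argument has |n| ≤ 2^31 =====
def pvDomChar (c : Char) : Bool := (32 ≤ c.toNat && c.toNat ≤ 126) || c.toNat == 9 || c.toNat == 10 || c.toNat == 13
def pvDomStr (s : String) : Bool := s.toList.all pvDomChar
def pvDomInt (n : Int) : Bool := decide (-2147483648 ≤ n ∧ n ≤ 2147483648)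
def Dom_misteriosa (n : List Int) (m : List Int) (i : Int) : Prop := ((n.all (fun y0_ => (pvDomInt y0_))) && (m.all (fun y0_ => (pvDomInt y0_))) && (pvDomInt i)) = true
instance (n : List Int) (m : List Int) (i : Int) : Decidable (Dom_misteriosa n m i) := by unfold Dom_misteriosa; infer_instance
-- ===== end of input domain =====

-- B replaces A's recursion by an explicit descending for-loop with an in-place swap; equivalence
-- is about the returned [n, m] value (both Pythons perform the same in-place mutations).

-- ===== PORT A =====
-- literal port of A's recursion; out-of-range reads (excluded by Pre_) default to 0
def misteriosa (n : List Int) (m : List Int) (i : Int) : List (List Int) :=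
  if 0 ≤ i then
    let ni := (PySem.List.pyGet? n i).getD 0
    let mi := (PySem.List.pyGet? m i).getD 0
    if ni < mi then misteriosa (n.set i.toNat mi) (m.set i.toNat ni) (i - 1)
    else misteriosa n m (i - 1)
  else [n, m]
termination_by (i + 1).toNat
decreasing_by all_goals omega

-- ===== PORT B =====
-- literal port of Source B: a fold over range(i, -1, -1) carrying the (n, m) pair
def misteriosa_alt (n : List Int) (m : List Int) (i : Int) : List (List Int) :=
  let p := (PySem.List.pyRange i (-1) (-1)).foldl
    (fun (p : List Int × List Int) idx =>
      let ni := (PySem.List.pyGet? p.1 idx).getD 0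
      let mi := (PySem.List.pyGet? p.2 idx).getD 0
      if ni < mi then (p.1.set idx.toNat mi, p.2.set idx.toNat ni) else p)
    (n, m)
  [p.1, p.2]

-- ===== PRECONDITION & SPEC =====
-- Pre_ excludes exactly the inputs on which Python A raises IndexError: 0 ≤ i but i out of range of n or m.
def Pre_misteriosa (n : List Int) (m : List Int) (i : Int) : Prop :=
  0 ≤ i → (i < (n.length : Int) ∧ i < (m.length : Int))
instance (n : List Int) (m : List Int) (i : Int) : Decidable (Pre_misteriosa n m i) := by
  unfold Pre_misteriosa; infer_instance
def pvWitness_misteriosa : List Int × List Int × Int := ([1, 5], [4, 2], 1)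

def Spec_misteriosa (n : List Int) (m : List Int) (i : Int) (out : List (List Int)) : Prop := out = misteriosa_alt n m i
instance (n : List Int) (m : List Int) (i : Int) (out : List (List Int)) : Decidable (Spec_misteriosa n m i out) := by unfold Spec_misteriosa; infer_instance

-- ===== CLAIM (what is proved, stated in full; the proofs are below) =====
def Claim_equal_misteriosa : Prop := ∀ (n : List Int) (m : List Int) (i : Int), Dom_misteriosa n m i → Pre_misteriosa n m i → Spec_misteriosa n m i (misteriosa n m i)

-- ===== LEMMAS AND PROOFS =====

lemma misteriosa_eq_alt (k : Nat) : ∀ (n m : List Int) (i : Int), (i + 1).toNat = k →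
    misteriosa n m i = misteriosa_alt n m i := by
  induction k with
  | zero =>
    intro n m i hk
    have hi : i < 0 := by omega
    rw [misteriosa]
    simp only [misteriosa_alt, PySem.List.pyRange_neg_one_eq_nil (by omega : i ≤ -1),
      List.foldl_nil]
    rw [if_neg (by omega)]
  | succ k ih =>
    intro n m i hk
    have hi : 0 ≤ i := by omega
    have hcons : PySem.List.pyRange i (-1) (-1) = i :: PySem.List.pyRange (i - 1) (-1) (-1) :=
      PySem.List.pyRange_neg_one_cons (by omega)
    rw [misteriosa, if_pos hi]
    simp only
    split_ifs with hlt
    · rw [ih _ _ _ (by omega)]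
      simp only [misteriosa_alt, hcons, List.foldl_cons, if_pos hlt]
    · rw [ih _ _ _ (by omega)]
      simp only [misteriosa_alt, hcons, List.foldl_cons, if_neg hlt]

-- ===== VERDICT (by name: the statement is the Claim_ definition above) =====
theorem misteriosa_spec : Claim_equal_misteriosa := by
  intro n m i _ _
  exact misteriosa_eq_alt ((i + 1).toNat) n m i rfl
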